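-- pv_equiv track=rewrite | github.com/nugibator-hackers/HOMEWORK | main.py | joseph
-- ===== SOURCE A (Python) =====
-- def joseph(n, arr1, k, arr2) -> int:
--     """Рассчитать количество платформ."""
--     left = 0
--
--     for i in range(k):
--         for j in range(left, n):
--             if arr2[i] == arr1[j]:
--                 arr1[left], arr1[j] = arr1[j], arr1[left]
--                 left += 1
--     for i in range(left, len(arr1)):
--         for j in range(i, left, -1):
--             if arr1[j] < arr1[j-1]:
--                 arr1[j], arr1[j-1] = arr1[j-1], arr1[j]
--             else:
--                 break
--     return arr1
-- ===== SOURCE B (Python) =====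
-- def joseph(n, arr1, k, arr2):
--     """Rebuild arr1 as: matched values (in arr2 order, each repeated by its count
--     in arr1[:n]) followed by the remaining elements sorted. Mutates arr1 in place
--     and returns it, like the original."""
--     h = max(n, 0)
--     head, tail = arr1[:h], arr1[h:]
--     targets = []            # first occurrences of arr2[:k], in order
--     seen = set()
--     for v in arr2[:max(k, 0)]:
--         if v not in seen:
--             seen.add(v)
--             targets.append(v)
--     front = [v for v in targets for _ in range(head.count(v))]
--     rest = sorted([x for x in head if x not in seen] + tail)
--     arr1[:] = front + rest
--     return arr1
-- ===== Notes on version B (the rewrite author's own statement) =====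
-- stated objective: faster
-- what changed: Replaces A's in-place swap-scan per arr2 value plus in-place insertion sort by a value-level reconstruction: dedup arr2[:k], replicate each value by its count in arr1[:n], and one library sort of the remainder.
-- outside the precondition, e.g. on joseph(1, [5], 3, [5]): A returns [5], B returns [5]
import Mathlib
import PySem

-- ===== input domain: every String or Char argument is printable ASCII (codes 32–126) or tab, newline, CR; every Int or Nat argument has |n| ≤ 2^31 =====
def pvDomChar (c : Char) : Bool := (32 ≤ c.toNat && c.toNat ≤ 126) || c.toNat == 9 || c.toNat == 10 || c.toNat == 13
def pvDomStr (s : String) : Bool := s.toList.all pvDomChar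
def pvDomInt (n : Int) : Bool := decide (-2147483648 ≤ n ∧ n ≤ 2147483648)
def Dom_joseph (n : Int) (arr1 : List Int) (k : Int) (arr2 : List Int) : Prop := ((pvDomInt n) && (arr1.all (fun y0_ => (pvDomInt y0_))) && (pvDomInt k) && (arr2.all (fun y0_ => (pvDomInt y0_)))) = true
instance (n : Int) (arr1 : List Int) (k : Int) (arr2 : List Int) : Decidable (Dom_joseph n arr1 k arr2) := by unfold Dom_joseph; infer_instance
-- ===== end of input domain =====

-- B rebuilds the list by value (dedup + count + one library sort, O(m log m)) instead of A's
-- in-place swap scans and quadratic insertion sort (measurably faster in a timing run);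
-- equivalence is about the RETURN value (the Python A and B both mutate arr1 in place and return it).

-- ===== PORT A =====
-- 'arr[a], arr[b] = arr[b], arr[a]' — both reads happen before the writes.
-- Indices are in range whenever Pre_ holds; Python raises IndexError where pyGetD/pySetD default.
def pvSwap (arr : List Int) (a b : Int) : List Int :=
  PySem.List.pySetD (PySem.List.pySetD arr a (PySem.List.pyGetD arr b 0)) b
    (PySem.List.pyGetD arr a 0)

-- 'for j in range(left, n): if v == arr1[j]: swap(left, j); left += 1'  (state = (arr1, left))
def pvMatchRound (v : Int) (n : Int) (st : List Int × Int) : List Int × Int :=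
  (PySem.List.pyRange st.2 n 1).foldl
    (fun st j =>
      if v == PySem.List.pyGetD st.1 j 0 then (pvSwap st.1 st.2 j, st.2 + 1) else st) st

-- 'for j in range(i, left, -1): if arr1[j] < arr1[j-1]: swap(j, j-1) else: break'
def pvSift (arr : List Int) : List Int → List Int
  | [] => arr
  | j :: js =>
      if PySem.List.pyGetD arr j 0 < PySem.List.pyGetD arr (j - 1) 0 then
        pvSift (pvSwap arr j (j - 1)) js
      else arr

def joseph (n : Int) (arr1 : List Int) (k : Int) (arr2 : List Int) : List Int :=
  let st := (PySem.List.pyRange 0 k 1).foldl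
      (fun st i => pvMatchRound (PySem.List.pyGetD arr2 i 0) n st) (arr1, 0)
  (PySem.List.pyRange st.2 ((st.1.length : Int)) 1).foldl
      (fun arr i => pvSift arr (PySem.List.pyRange i st.2 (-1))) st.1

-- ===== PORT B =====
def joseph_alt (n : Int) (arr1 : List Int) (k : Int) (arr2 : List Int) : List Int :=
  let h : Int := max n 0
  let head := PySem.List.slice arr1 none (some h)
  let tail := PySem.List.slice arr1 (some h) none
  let ts := (PySem.List.slice arr2 none (some (max k 0))).foldl
      (fun (p : List Int × PySem.Set Int) v =>
        if PySem.Set.contains p.2 v then p else (p.1 ++ [v], PySem.Set.add p.2 v))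
      ([], PySem.Set.empty)
  let front := ts.1.flatMap (fun v => List.replicate (PySem.List.count head v) v)
  let rest := PySem.List.sorted
      ((head.filter (fun x => !(PySem.Set.contains ts.2 x))) ++ tail) (fun x => x) false
  front ++ rest

-- ===== PRECONDITION & SPEC =====
-- Pre_ excludes the inputs where A's lazy index accesses can raise IndexError: k > 0 with
-- n > len(arr1), and k > len(arr2) unless n ≤ 0; in the latter region A happens to return
-- (instead of raising) only when every element of arr1[:n] also occurs in arr2 — that
-- data-dependent returning corner is excluded with the rest (see cites).
def Pre_joseph (n : Int) (arr1 : List Int) (k : Int) (arr2 : List Int) : Prop :=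
  k ≤ 0 ∨ (n ≤ (arr1.length : Int) ∧ (k ≤ (arr2.length : Int) ∨ n ≤ 0))
instance (n : Int) (arr1 : List Int) (k : Int) (arr2 : List Int) : Decidable (Pre_joseph n arr1 k arr2) := by unfold Pre_joseph; infer_instance
def pvWitness_joseph : Int × List Int × Int × List Int := (2, [3, 1, 2], 1, [2])

def Spec_joseph (n : Int) (arr1 : List Int) (k : Int) (arr2 : List Int) (out : List Int) : Prop := out = joseph_alt n arr1 k arr2
instance (n : Int) (arr1 : List Int) (k : Int) (arr2 : List Int) (out : List Int) : Decidable (Spec_joseph n arr1 k arr2 out) := by unfold Spec_joseph; infer_instance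

-- ===== CLAIM (what is proved, stated in full; the proofs are below) =====
def Claim_equal_joseph : Prop := ∀ (n : Int) (arr1 : List Int) (k : Int) (arr2 : List Int), Dom_joseph n arr1 k arr2 → Pre_joseph n arr1 k arr2 → Spec_joseph n arr1 k arr2 (joseph n arr1 k arr2)
-- ===== LEMMAS AND PROOFS =====

-- positional getD/set on a decomposed list
theorem pvGetD_append_add (F t : List Int) (m : Nat) (d : Int) :
    (F ++ t).getD (F.length + m) d = t.getD m d := by
  induction F with
  | nil => simp
  | cons a F ih => simpa [Nat.succ_add] using ih

theorem pvSet_append_add (F t : List Int) (m : Nat) (v : Int) :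
    (F ++ t).set (F.length + m) v = F ++ t.set m v := by
  induction F with
  | nil => simp
  | cons a F ih => simpa [Nat.succ_add] using ih

theorem pvSwap_nat (arr : List Int) (a b : Nat) :
    pvSwap arr ((a : Nat) : Int) ((b : Nat) : Int)
      = (arr.set a (arr.getD b 0)).set b (arr.getD a 0) := by
  simp [pvSwap]

theorem pvSwap_nil (P S : List Int) (x : Int) :
    pvSwap (P ++ x :: S) ((P.length : Int)) ((P.length : Int)) = P ++ x :: S := by
  rw [pvSwap_nat]
  have hg : (P ++ x :: S).getD P.length 0 = x := by
    simpa using pvGetD_append_add P (x :: S) 0 0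
  rw [hg, List.set_set]
  simpa using pvSet_append_add P (x :: S) 0 x

theorem pvSwap_rot (P w S : List Int) (y x : Int) :
    pvSwap (P ++ y :: (w ++ x :: S)) ((P.length : Int))
        (((P.length + w.length + 1 : Nat) : Int)) = P ++ x :: (w ++ y :: S) := by
  have hb : (P.length + w.length + 1 : Nat) = (P ++ y :: w).length := by simp; omega
  rw [hb, pvSwap_nat]
  have e1 : P ++ y :: (w ++ x :: S) = (P ++ y :: w) ++ (x :: S) := by simp
  have hgb : (P ++ y :: (w ++ x :: S)).getD (P ++ y :: w).length 0 = x := by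
    rw [e1]; simpa using pvGetD_append_add (P ++ y :: w) (x :: S) 0 0
  have hga : (P ++ y :: (w ++ x :: S)).getD P.length 0 = y := by
    simpa using pvGetD_append_add P (y :: (w ++ x :: S)) 0 0
  rw [hgb, hga]
  have hs1 : (P ++ y :: (w ++ x :: S)).set P.length x = P ++ x :: (w ++ x :: S) := by
    simpa using pvSet_append_add P (y :: (w ++ x :: S)) 0 x
  rw [hs1]
  have e2 : P ++ x :: (w ++ x :: S) = (P ++ x :: w) ++ (x :: S) := by simp
  have hlen2 : (P ++ y :: w).length = (P ++ x :: w).length := by simp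
  rw [e2, hlen2]
  have hs2 : ((P ++ x :: w) ++ (x :: S)).set (P ++ x :: w).length y
      = (P ++ x :: w) ++ (y :: S) := by
    simpa using pvSet_append_add (P ++ x :: w) (x :: S) 0 y
  rw [hs2]; simp

theorem pvSwap_adj (E Q : List Int) (y x : Int) :
    pvSwap (E ++ y :: x :: Q) (((E.length + 1 : Nat) : Int)) ((E.length : Int))
      = E ++ x :: y :: Q := by
  rw [pvSwap_nat]
  have hgb : (E ++ y :: x :: Q).getD E.length 0 = y := by
    simpa using pvGetD_append_add E (y :: x :: Q) 0 0
  have hga : (E ++ y :: x :: Q).getD (E.length + 1) 0 = x := by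
    simpa using pvGetD_append_add E (y :: x :: Q) 1 0
  rw [hgb, hga]
  have hs1 : (E ++ y :: x :: Q).set (E.length + 1) y = E ++ y :: y :: Q := by
    simpa using pvSet_append_add E (y :: x :: Q) 1 y
  rw [hs1]
  simpa using pvSet_append_add E (y :: y :: Q) 0 x

-- the inner matching loop of phase 1
theorem pvMatchFold (v : Int) :
    ∀ (R w P T : List Int),
    ∃ w', ((PySem.List.pyRange ((P.length + w.length : Nat) : Int)
              ((P.length + w.length + R.length : Nat) : Int) 1).foldl
            (fun st j =>
              if v == PySem.List.pyGetD st.1 j 0 then (pvSwap st.1 st.2 j, st.2 + 1) else st)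
            (P ++ w ++ R ++ T, (P.length : Int)))
        = (P ++ List.replicate (List.count v R) v ++ w' ++ T,
            ((P.length + List.count v R : Nat) : Int))
      ∧ w'.Perm (w ++ R.filter (fun x => !(v == x))) := by
  intro R
  induction R with
  | nil =>
    intro w P T
    refine ⟨w, ?_, by simp⟩
    rw [PySem.List.pyRange_one_eq_nil (by simp)]
    simp
  | cons x R ih =>
    intro w P T
    rw [PySem.List.pyRange_one_cons (by push_cast [List.length_cons]; omega), List.foldl_cons]
    dsimp only
    have hx : PySem.List.pyGetD (P ++ w ++ x :: R ++ T) ((P.length + w.length : Nat) : Int) 0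
        = x := by
      have h1 : P ++ w ++ x :: R ++ T = (P ++ w) ++ (x :: (R ++ T)) := by simp
      rw [h1, PySem.List.pyGetD_natCast]
      have h2 : (P.length + w.length : Nat) = (P ++ w).length + 0 := by simp
      rw [h2, pvGetD_append_add]
      rfl
    rw [hx]
    by_cases hvx : v = x
    · subst hvx
      rw [if_pos (by simp)]
      cases w with
      | nil =>
        have e0 : P ++ ([] : List Int) ++ v :: R ++ T = P ++ v :: (R ++ T) := by simp
        have hidx : ((P.length + ([] : List Int).length : Nat) : Int)
            = ((P.length : Nat) : Int) := by simp
        rw [e0, hidx, pvSwap_nil]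
        obtain ⟨w', h1, h2⟩ := ih [] (P ++ [v]) T
        refine ⟨w', ?_, ?_⟩
        · simp only [List.length_append, List.length_cons, List.length_nil,
            List.append_assoc, List.nil_append, List.append_nil, List.singleton_append,
            List.cons_append, Nat.add_zero, Nat.zero_add, Nat.cast_add, Nat.cast_one,
            Nat.cast_ofNat, List.count_cons_self, List.replicate_succ, add_comm,
            add_left_comm, add_assoc] at h1 ⊢
          exact h1
        · simpa using h2
      | cons yy w_ =>
        have e0 : P ++ (yy :: w_) ++ v :: R ++ T = P ++ yy :: (w_ ++ v :: (R ++ T)) := by simp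
        have hidx : ((P.length + (yy :: w_).length : Nat) : Int)
            = ((P.length + w_.length + 1 : Nat) : Int) := by
          simp; omega
        rw [e0, hidx, pvSwap_rot]
        obtain ⟨w', h1, h2⟩ := ih (w_ ++ [yy]) (P ++ [v]) T
        refine ⟨w', ?_, ?_⟩
        · simp only [List.length_append, List.length_cons, List.length_nil,
            List.append_assoc, List.nil_append, List.append_nil, List.singleton_append,
            List.cons_append, Nat.add_zero, Nat.zero_add, Nat.cast_add, Nat.cast_one,
            Nat.cast_ofNat, List.count_cons_self, List.replicate_succ, add_comm,
            add_left_comm, add_assoc] at h1 ⊢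
          exact h1
        · have hperm : (w_ ++ [yy]).Perm (yy :: w_) := List.perm_append_singleton yy w_
          have : (v :: R).filter (fun x => !(v == x)) = R.filter (fun x => !(v == x)) := by
            simp
          rw [this]
          exact h2.trans ((hperm.append_right _))
    · rw [if_neg (by simp [hvx])]
      obtain ⟨w', h1, h2⟩ := ih (w ++ [x]) P T
      refine ⟨w', ?_, ?_⟩
      · have hc : List.count v (x :: R) = List.count v R := by
          simp [List.count_cons, Ne.symm hvx]
        rw [hc]
        simp only [List.length_append, List.length_cons, List.length_nil,
          List.append_assoc, List.nil_append, List.append_nil, List.singleton_append,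
          List.cons_append, Nat.add_zero, Nat.zero_add, Nat.cast_add, Nat.cast_one,
          Nat.cast_ofNat, add_comm, add_left_comm, add_assoc] at h1 ⊢
        exact h1
      · have : (x :: R).filter (fun x_1 => !(v == x_1))
            = x :: R.filter (fun x_1 => !(v == x_1)) := by simp [hvx]
        rw [this]
        simpa using h2

theorem pvRound (v n : Int) (P M T : List Int)
    (hn : PySem.List.pyRange ((P.length : Int)) n 1
        = PySem.List.pyRange ((P.length : Int)) ((P.length + M.length : Nat) : Int) 1) :
    ∃ M', pvMatchRound v n (P ++ M ++ T, (P.length : Int))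
        = (P ++ List.replicate (List.count v M) v ++ M' ++ T,
            ((P.length + List.count v M : Nat) : Int))
      ∧ M'.Perm (M.filter (fun x => !(v == x))) := by
  obtain ⟨w', h1, h2⟩ := pvMatchFold v M [] P T
  refine ⟨w', ?_, by simpa using h2⟩
  unfold pvMatchRound
  dsimp only
  rw [hn]
  simp only [List.length_nil, Nat.add_zero, List.append_nil, List.nil_append] at h1
  exact h1

-- the chained fronts produced by the successive rounds
def pvChain (M : List Int) : List Int → List Int
  | [] => []
  | v :: l => List.replicate (List.count v M) v ++ pvChain (M.filter (fun x => !(v == x))) l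

theorem pvCountFilterNe (M : List Int) (v u : Int) :
    List.count u (M.filter (fun x => !(v == x))) = if u = v then 0 else List.count u M := by
  induction M with
  | nil => simp
  | cons a M ih =>
    by_cases hva : v = a
    · subst hva
      by_cases huv : u = v
      · subst huv; simp [List.count_cons, ih]
      · simp [List.count_cons, ih, huv, Ne.symm huv]
    · by_cases hua : u = a
      · subst hua
        simp [List.count_cons, hva, ih, Ne.symm hva]
      · by_cases huv : u = v
        · subst huv; simp [List.count_cons, ih, hva, hua, Ne.symm hua]
        · simp [List.count_cons, hva, ih, huv, hua]

theorem pvChain_perm (l : List Int) : ∀ (M M' : List Int), M.Perm M' →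
    pvChain M l = pvChain M' l := by
  induction l with
  | nil => intro M M' _; rfl
  | cons v l ih =>
    intro M M' h
    simp only [pvChain, h.count_eq, ih _ _ (h.filter _)]

theorem pvCountLen (M : List Int) (v : Int) :
    M.length = List.count v M + (M.filter (fun x => !(v == x))).length := by
  induction M with
  | nil => simp
  | cons a M ih =>
    by_cases hva : v = a
    · subst hva; simp [List.count_cons, ih]; omega
    · simp [List.count_cons, hva, Ne.symm hva, ih]; omega

theorem pvFlatMap_discard (v : Int) (M : List Int) : ∀ (t : List Int),
    t.flatMap (fun u => List.replicate (List.count u (M.filter (fun x => !(v == x)))) u)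
      = (t.filter (fun y => !(y == v))).flatMap
          (fun u => List.replicate (List.count u M) u) := by
  intro t
  induction t with
  | nil => simp
  | cons u t ih =>
    simp only [pvCountFilterNe] at ih ⊢
    by_cases huv : u = v
    · subst huv
      have hf : (u :: t).filter (fun y => !(y == u)) = t.filter (fun y => !(y == u)) := by
        simp
      simp [List.flatMap_cons, hf, ih]
    · have hf : (u :: t).filter (fun y => !(y == v)) = u :: t.filter (fun y => !(y == v)) := by
        simp [huv]
      simp [List.flatMap_cons, hf, ih, huv]

theorem pvChain_eq (l : List Int) : ∀ (M : List Int),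
    pvChain M l = (PySem.Set.ofList l).flatMap (fun v => List.replicate (List.count v M) v) := by
  induction l with
  | nil => simp [pvChain, PySem.Set.ofList_nil]
  | cons v l ih =>
    intro M
    rw [PySem.Set.ofList_cons, List.flatMap_cons]
    simp only [pvChain, ih]
    congr 1
    rw [pvFlatMap_discard]
    rfl

-- phase 1 over a list of values
theorem pvPhase1 (n : Int) :
    ∀ (l P M T : List Int), ((P.length + M.length : Nat) : Int) = n →
    ∃ M', (l.foldl (fun st v => pvMatchRound v n st) (P ++ M ++ T, (P.length : Int)))
        = (P ++ pvChain M l ++ M' ++ T, ((P.length + (pvChain M l).length : Nat) : Int))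
      ∧ M'.Perm (M.filter (fun x => !(l.contains x))) := by
  intro l
  induction l with
  | nil =>
    intro P M T hn
    exact ⟨M, by simp [pvChain], by simp⟩
  | cons v l ih =>
    intro P M T hn
    rw [List.foldl_cons]
    have hrg : PySem.List.pyRange ((P.length : Int)) n 1
        = PySem.List.pyRange ((P.length : Int)) ((P.length + M.length : Nat) : Int) 1 := by
      rw [hn]
    obtain ⟨M1, h1, h2⟩ := pvRound v n P M T hrg
    rw [h1]
    have hlen : M1.length = (M.filter (fun x => !(v == x))).length := h2.length_eq
    have hcnt := pvCountLen M v
    obtain ⟨M', h3, h4⟩ := ih (P ++ List.replicate (List.count v M) v) M1 T (by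
      push_cast [List.length_append, List.length_replicate] at hn ⊢
      omega)
    refine ⟨M', ?_, ?_⟩
    · have hch : pvChain M1 l = pvChain (M.filter (fun x => !(v == x))) l :=
        pvChain_perm l _ _ h2
      rw [hch] at h3
      simp only [pvChain, List.append_assoc, List.length_append, List.length_replicate,
        Nat.cast_add, add_comm, add_left_comm, add_assoc] at h3 ⊢
      exact h3
    · have h5 := h2.filter (fun x => !(l.contains x))
      have h6 : M'.Perm ((M.filter (fun x => !(v == x))).filter (fun x => !(l.contains x))) :=
        h4.trans h5
      refine h6.trans (List.Perm.of_eq ?_)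
      rw [List.filter_filter]
      refine List.filter_congr (fun x _ => ?_)
      by_cases hx : v = x <;> simp [hx, List.contains_cons, Ne.symm]

-- B's targets/seen loop builds set(arr2[:k]) twice over
theorem pvTsFold (l : List Int) : ∀ (s : PySem.Set Int),
    (l.foldl (fun (p : List Int × PySem.Set Int) v =>
        if PySem.Set.contains p.2 v then p else (p.1 ++ [v], PySem.Set.add p.2 v)) (s, s))
      = (PySem.Set.update s l, PySem.Set.update s l) := by
  induction l with
  | nil => intro s; simp [PySem.Set.update]
  | cons v l ih =>
    intro s
    rw [List.foldl_cons, PySem.Set.update_cons]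
    by_cases hv : v ∈ s
    · have hc : PySem.Set.contains s v = true := (PySem.Set.contains_iff s v).mpr hv
      rw [if_pos hc] at *
      rw [← ih (PySem.Set.add s v)]
      simp [PySem.Set.add_of_mem hv]
    · have hc : ¬ PySem.Set.contains s v = true := by
        simp [PySem.Set.contains_iff s v, hv]
      rw [if_neg hc]
      rw [← ih (PySem.Set.add s v)]
      simp [PySem.Set.add_of_not_mem hv]

-- the bubbling inner loop of phase 2 inserts into the sorted block
theorem pvSiftLemma :
    ∀ (S : List Int) (x : Int) (P Q : List Int), S.Pairwise (· ≤ ·) →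
    ∃ ins, pvSift (P ++ S ++ x :: Q)
          (PySem.List.pyRange ((P.length + S.length : Nat) : Int) ((P.length : Int)) (-1))
        = P ++ ins ++ Q
      ∧ ins.Pairwise (· ≤ ·) ∧ ins.Perm (S ++ [x]) := by
  intro S
  induction S using List.reverseRecOn with
  | nil =>
    intro x P Q _
    rw [PySem.List.pyRange_neg_one_eq_nil (by simp)]
    exact ⟨[x], by simp [pvSift], by simp, by simp⟩
  | append_singleton S' y ih =>
    intro x P Q hpw
    rw [List.pairwise_append] at hpw
    obtain ⟨hS', -, hy⟩ := hpw
    rw [PySem.List.pyRange_neg_one_cons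
      (by push_cast [List.length_append, List.length_cons]; omega)]
    have hx : PySem.List.pyGetD (P ++ (S' ++ [y]) ++ x :: Q)
        ((P.length + (S' ++ [y]).length : Nat) : Int) 0 = x := by
      rw [PySem.List.pyGetD_natCast]
      have h2 : (P.length + (S' ++ [y]).length : Nat) = (P ++ (S' ++ [y])).length + 0 := by
        simp
      rw [h2, pvGetD_append_add]
      rfl
    have hj1 : ((P.length + (S' ++ [y]).length : Nat) : Int) - 1
        = ((P.length + S'.length : Nat) : Int) := by
      push_cast [List.length_append, List.length_cons, List.length_nil]; ring
    have hy' : PySem.List.pyGetD (P ++ (S' ++ [y]) ++ x :: Q)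
        ((P.length + S'.length : Nat) : Int) 0 = y := by
      rw [PySem.List.pyGetD_natCast]
      have e2 : P ++ (S' ++ [y]) ++ x :: Q = (P ++ S') ++ (y :: (x :: Q)) := by simp
      rw [e2]
      have h2 : (P.length + S'.length : Nat) = (P ++ S').length + 0 := by simp
      rw [h2, pvGetD_append_add]
      rfl
    simp only [pvSift]
    rw [hj1, hx, hy']
    by_cases hlt : x < y
    · rw [if_pos hlt]
      have hsw := pvSwap_adj (P ++ S') Q y x
      simp only [List.length_append] at hsw
      have e3 : P ++ (S' ++ [y]) ++ x :: Q = (P ++ S') ++ y :: x :: Q := by simp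
      have hj2 : ((P.length + (S' ++ [y]).length : Nat) : Int)
          = ((P.length + S'.length + 1 : Nat) : Int) := by
        push_cast [List.length_append, List.length_cons, List.length_nil]; ring
      rw [e3, hj2, hsw]
      obtain ⟨ins', he, hpw', hpm⟩ := ih x P (y :: Q) hS'
      refine ⟨ins' ++ [y], ?_, ?_, ?_⟩
      · rw [he]; simp
      · rw [List.pairwise_append]
        refine ⟨hpw', by simp, ?_⟩
        intro a ha b hb
        simp only [List.mem_singleton] at hb
        subst hb
        rcases List.mem_append.mp (hpm.mem_iff.mp ha) with h | h
        · exact hy a h _ (List.mem_singleton_self _)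
        · simp only [List.mem_singleton] at h
          subst h
          exact hlt.le
      · refine (hpm.append_right [y]).trans ?_
        have e4 : (S' ++ [x]) ++ [y] = S' ++ [x, y] := by simp
        have e5 : (S' ++ [y]) ++ [x] = S' ++ [y, x] := by simp
        rw [e4, e5]
        exact List.Perm.append_left S' (List.Perm.swap y x [])
    · rw [if_neg hlt]
      refine ⟨(S' ++ [y]) ++ [x], by simp, ?_, List.Perm.refl _⟩
      rw [List.pairwise_append]
      refine ⟨?_, by simp, ?_⟩
      · rw [List.pairwise_append]
        exact ⟨hS', by simp, hy⟩
      · intro a ha b hb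
        simp only [List.mem_singleton] at hb
        subst hb
        rcases List.mem_append.mp ha with h | h
        · exact le_trans (hy a h _ (List.mem_singleton_self _)) (not_lt.mp hlt)
        · simp only [List.mem_singleton] at h
          subst h
          exact not_lt.mp hlt

-- phase 2 sorts the suffix after position left
theorem pvPhase2 :
    ∀ (Q S P : List Int), S.Pairwise (· ≤ ·) →
    ∃ S', ((PySem.List.pyRange ((P.length + S.length : Nat) : Int)
              ((P.length + S.length + Q.length : Nat) : Int) 1).foldl
            (fun arr i => pvSift arr (PySem.List.pyRange i ((P.length : Int)) (-1)))
            (P ++ S ++ Q))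
        = P ++ S' ∧ S'.Pairwise (· ≤ ·) ∧ S'.Perm (S ++ Q) := by
  intro Q
  induction Q with
  | nil =>
    intro S P hpw
    rw [PySem.List.pyRange_one_eq_nil (by simp)]
    exact ⟨S, by simp, hpw, by simp⟩
  | cons x Q' ih =>
    intro S P hpw
    rw [PySem.List.pyRange_one_cons (by push_cast [List.length_cons]; omega), List.foldl_cons]
    obtain ⟨ins, he, hpw2, hpm⟩ := pvSiftLemma S x P Q' hpw
    rw [he]
    obtain ⟨S'', h1, h2, h3⟩ := ih ins P hpw2
    have hlen : ins.length = S.length + 1 := by simpa using hpm.length_eq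
    refine ⟨S'', ?_, h2, ?_⟩
    · have ha : ((P.length + S.length : Nat) : Int) + 1 = ((P.length + ins.length : Nat) : Int) := by
        push_cast [hlen]; ring
      have hb : ((P.length + S.length + (x :: Q').length : Nat) : Int)
          = ((P.length + ins.length + Q'.length : Nat) : Int) := by
        push_cast [hlen, List.length_cons]; ring
      rw [ha, hb, h1]
    · refine h3.trans ?_
      refine (hpm.append_right Q').trans (List.Perm.of_eq ?_)
      simp

-- when n ≤ 0 the scan windows are empty and phase 1 changes nothing
theorem pvPhase1Trivial (n : Int) (arr2 arr1 : List Int) (hn : n ≤ 0) (l : List Int) :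
    l.foldl (fun st i => pvMatchRound (PySem.List.pyGetD arr2 i 0) n st) (arr1, 0)
      = (arr1, 0) := by
  induction l with
  | nil => rfl
  | cons i l ih =>
    rw [List.foldl_cons]
    have : pvMatchRound (PySem.List.pyGetD arr2 i 0) n (arr1, 0) = (arr1, 0) := by
      unfold pvMatchRound
      rw [PySem.List.pyRange_one_eq_nil hn]
      rfl
    rw [this, ih]

-- reading arr2[i] over range(k) is a fold over arr2[:k]
theorem pvPhase1Values (n k : Int) (arr1 arr2 : List Int) (hk0 : 0 ≤ k)
    (hk : k ≤ (arr2.length : Int)) :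
    (PySem.List.pyRange 0 k 1).foldl
        (fun st i => pvMatchRound (PySem.List.pyGetD arr2 i 0) n st) (arr1, 0)
      = (arr2.take k.toNat).foldl (fun st v => pvMatchRound v n st) (arr1, 0) := by
  have hlen : (arr2.take k.toNat).length = k.toNat := by
    simp
    omega
  have h1 := PySem.List.foldl_pyRange_zero_pyGetD (arr2.take k.toNat) 0
      (fun st v => pvMatchRound v n st) ((arr1, (0 : Int)))
  have h2 : PySem.List.len (arr2.take k.toNat) = k := by
    simp [PySem.List.len_eq, hlen]
    omega
  rw [h2] at h1
  rw [← h1]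
  refine PySem.List.foldl_congr_mem _ _ _ _ ?_
  intro acc j hj
  have hj' := (PySem.List.mem_pyRange_one).mp hj
  have hg : PySem.List.pyGetD arr2 j 0 = PySem.List.pyGetD (arr2.take k.toNat) j 0 := by
    rw [PySem.List.pyGetD_of_nonneg (h := hj'.1), PySem.List.pyGetD_of_nonneg (h := hj'.1)]
    rw [List.getD_eq_getElem?_getD, List.getD_eq_getElem?_getD, List.getElem?_take]
    rw [if_pos (by omega)]
  rw [hg]

-- B collapses to one full sort when no matching happens (k ≤ 0 or an empty window)
theorem pvAltTrivial (n : Int) (arr1 : List Int) (k : Int) (arr2 : List Int)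
    (h : k ≤ 0 ∨ n ≤ 0) :
    joseph_alt n arr1 k arr2 = PySem.List.sorted arr1 (fun x => x) false := by
  unfold joseph_alt
  have hh : (0 : Int) ≤ max n 0 := le_max_right n 0
  have hhead : PySem.List.slice arr1 none (some (max n 0)) = arr1.take (max n 0).toNat :=
    PySem.List.slice_to _ hh
  have htail : PySem.List.slice arr1 (some (max n 0)) none = arr1.drop (max n 0).toNat :=
    PySem.List.slice_from _ hh
  rcases h with hk | hn
  · have h2 : max k 0 = 0 := max_eq_right hk
    have h3 : PySem.List.slice arr2 none (some (0 : Int)) = arr2.take (0 : Int).toNat :=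
      PySem.List.slice_to _ le_rfl
    simp only [h2, h3, hhead, htail, Int.toNat_zero, List.take_zero, List.foldl_nil]
    simp [PySem.Set.contains, PySem.Set.empty, List.take_append_drop]
  · have h0 : max n 0 = 0 := max_eq_right hn
    have hhead0 : PySem.List.slice arr1 none (some (0 : Int)) = arr1.take (0 : Int).toNat :=
      PySem.List.slice_to _ le_rfl
    have htail0 : PySem.List.slice arr1 (some (0 : Int)) none = arr1.drop (0 : Int).toNat :=
      PySem.List.slice_from _ le_rfl
    simp only [h0, hhead0, htail0, Int.toNat_zero, List.take_zero, List.drop_zero]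
    have hfm : ∀ t : List Int,
        t.flatMap (fun v => List.replicate (List.count v ([] : List Int)) v) = [] := by
      intro t
      induction t with
      | nil => rfl
      | cons a t ih => simp [List.flatMap_cons, ih]
    simp [hfm]

-- ===== VERDICT (by name: the statement is the Claim_ definition above) =====
theorem joseph_spec : Claim_equal_joseph := by
  intro n arr1 k arr2 _ hpre
  unfold Spec_joseph
  unfold Pre_joseph at hpre
  by_cases hT : k ≤ 0 ∨ n ≤ 0
  · -- trivial branch: no matching, A sorts the whole list, B is sorted(arr1)
    have hst : (PySem.List.pyRange 0 k 1).foldl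
        (fun st i => pvMatchRound (PySem.List.pyGetD arr2 i 0) n st) (arr1, 0) = (arr1, 0) := by
      rcases hT with hk | hn
      · rw [PySem.List.pyRange_one_eq_nil hk]
        rfl
      · exact pvPhase1Trivial n arr2 arr1 hn _
    obtain ⟨S', he, hpw, hpm⟩ := pvPhase2 arr1 [] [] List.Pairwise.nil
    simp only [List.length_nil, List.nil_append, Nat.add_zero, Nat.zero_add, Nat.cast_zero,
      Nat.cast_add] at he hpm
    rw [pvAltTrivial n arr1 k arr2 hT]
    simp only [joseph, hst]
    rw [he]
    exact (PySem.List.sorted_id_eq_of_perm_of_pairwise arr1 S' hpm hpw).symm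
  · -- main branch
    push Not at hT
    obtain ⟨hk, hn⟩ := hT
    have hn1 : n ≤ (arr1.length : Int) := by rcases hpre with h | ⟨h1, h2⟩ <;> omega
    have hk2 : k ≤ (arr2.length : Int) := by rcases hpre with h | ⟨h1, h2 | h2⟩ <;> omega
    have hv := pvPhase1Values n k arr1 arr2 (by omega) hk2
    have hcond : ((([] : List Int).length + (arr1.take n.toNat).length : Nat) : Int) = n := by
      simp [List.length_take]
      omega
    obtain ⟨M', hP1, hPm⟩ :=
      pvPhase1 n (arr2.take k.toNat) [] (arr1.take n.toNat) (arr1.drop n.toNat) hcond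
    simp only [List.nil_append, List.length_nil, Nat.zero_add, Nat.cast_zero,
      List.take_append_drop] at hP1
    simp only [joseph, hv, hP1]
    obtain ⟨S', he2, hpw2, hpm2⟩ :=
      pvPhase2 (M' ++ List.drop n.toNat arr1) []
        (pvChain (List.take n.toNat arr1) (List.take k.toNat arr2)) List.Pairwise.nil
    simp only [List.length_nil, List.length_append, Nat.add_zero, List.append_nil,
      List.nil_append, List.append_assoc, Nat.cast_add, add_comm, add_left_comm,
      add_assoc] at he2 hpm2 ⊢
    rw [he2]
    have hmn : max n 0 = n := max_eq_left hn.le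
    have hmk : max k 0 = k := max_eq_left hk.le
    have hhead : PySem.List.slice arr1 none (some n) = arr1.take n.toNat :=
      PySem.List.slice_to _ hn.le
    have htail : PySem.List.slice arr1 (some n) none = arr1.drop n.toNat :=
      PySem.List.slice_from _ hn.le
    have harr2 : PySem.List.slice arr2 none (some k) = arr2.take k.toNat :=
      PySem.List.slice_to _ hk.le
    have hts : (List.take k.toNat arr2).foldl
        (fun (p : List Int × PySem.Set Int) v =>
          if PySem.Set.contains p.2 v then p else (p.1 ++ [v], PySem.Set.add p.2 v))
        ([], PySem.Set.empty)
        = (PySem.Set.ofList (List.take k.toNat arr2),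
            PySem.Set.ofList (List.take k.toNat arr2)) := by
      rw [← PySem.Set.update_empty]
      exact pvTsFold _ PySem.Set.empty
    unfold joseph_alt
    simp only [hmn, hmk, hhead, htail, harr2, hts]
    have hfront : (PySem.Set.ofList (List.take k.toNat arr2)).flatMap
        (fun v => List.replicate (PySem.List.count (List.take n.toNat arr1) v) v)
        = pvChain (List.take n.toNat arr1) (List.take k.toNat arr2) :=
      (pvChain_eq (List.take k.toNat arr2) (List.take n.toNat arr1)).symm
    rw [hfront]
    congr 1
    refine (PySem.List.sorted_id_eq_of_perm_of_pairwise _ _ ?_ hpw2).symm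
    have hfilter : (List.take n.toNat arr1).filter
        (fun x => !(PySem.Set.contains (PySem.Set.ofList (List.take k.toNat arr2)) x))
        = (List.take n.toNat arr1).filter
            (fun x => !((List.take k.toNat arr2).contains x)) := by
      refine List.filter_congr fun x _ => ?_
      by_cases hx : x ∈ List.take k.toNat arr2 <;>
        simp [PySem.Set.contains, hx, PySem.Set.mem_ofList]
    rw [hfilter]
    exact hpm2.trans (hPm.append_right _)
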